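-- pv_equiv track=rewrite | github.com/yrod15x/Python | De Otros Py/coin_flip.py | secuencia_cara
-- ===== SOURCE A (Python) =====
-- def secuencia_cara(lanzamientos):
--     """Mide si una moneda cae en cara de una lista se repite 6 veces"""
--     cont_caras = 0
--     contador_general = 0
--     for probabilidad in lanzamientos:
--         if probabilidad == 'S':
--             cont_caras += 1
--             if cont_caras == 6:
--                 contador_general += 1
--         else:
--             cont_caras = 0
--     return contador_general
-- ===== SOURCE B (Python) =====
-- def secuencia_cara(lanzamientos):
--     """Mide si una moneda cae en cara de una lista se repite 6 veces"""
--     total = 0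
--     n = len(lanzamientos)
--     i = 0
--     while i < n:
--         x = lanzamientos[i]
--         j = i + 1
--         while j < n and lanzamientos[j] == x:
--             j += 1
--         if x == 'S' and j - i >= 6:
--             total += 1
--         i = j
--     return total
-- ===== Notes on version B (the rewrite author's own statement) =====
-- stated objective: alternative
-- what changed: B decomposes the list into maximal runs of equal consecutive elements and counts the runs of 'S' of length >= 6, instead of A's flat pass with a running counter that resets and fires at exactly 6.
import Mathlib
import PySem

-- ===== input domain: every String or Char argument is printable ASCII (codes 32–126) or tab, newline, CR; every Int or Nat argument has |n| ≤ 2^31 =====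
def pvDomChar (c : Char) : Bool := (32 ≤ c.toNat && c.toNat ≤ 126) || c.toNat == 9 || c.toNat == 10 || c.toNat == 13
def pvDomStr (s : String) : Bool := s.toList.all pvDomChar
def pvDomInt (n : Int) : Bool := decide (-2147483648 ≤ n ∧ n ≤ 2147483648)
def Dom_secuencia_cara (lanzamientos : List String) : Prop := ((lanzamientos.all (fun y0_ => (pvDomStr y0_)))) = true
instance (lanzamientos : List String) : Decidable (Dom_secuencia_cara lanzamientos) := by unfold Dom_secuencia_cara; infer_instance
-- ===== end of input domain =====

-- B counts maximal runs of equal consecutive elements and counts 'S'-runs of length ≥ 6,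
-- instead of A's flat pass with a resetting counter (alternative decomposition, same cost).


-- ===== PORT A =====
def pvStepA (st : Int × Int) (probabilidad : String) : Int × Int :=
  if probabilidad == "S" then
    let c := st.1 + 1
    (c, if c == 6 then st.2 + 1 else st.2)
  else
    (0, st.2)

def secuencia_cara (lanzamientos : List String) : Int :=
  (lanzamientos.foldl pvStepA (0, 0)).2

-- ===== PORT B =====
-- outer while loop of B: peel one maximal run off the front of `rest`
def pvAltLoop (total : Int) (rest : List String) : Int :=
  match rest with
  | [] => total
  | x :: xs =>
    -- inner while loop: k = length of the maximal run of x at the front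
    let k : Int := 1 + (xs.takeWhile (fun a => a == x)).length
    pvAltLoop (if x == "S" && decide (6 ≤ k) then total + 1 else total)
      (xs.dropWhile (fun a => a == x))
termination_by rest.length
decreasing_by
  simp only [List.length_cons]
  exact Nat.lt_succ_of_le (List.length_dropWhile_le _ _)

def secuencia_cara_alt (lanzamientos : List String) : Int :=
  pvAltLoop 0 lanzamientos

-- ===== PRECONDITION & SPEC =====
def Spec_secuencia_cara (lanzamientos : List String) (out : Int) : Prop := out = secuencia_cara_alt lanzamientos
instance (lanzamientos : List String) (out : Int) : Decidable (Spec_secuencia_cara lanzamientos out) := by unfold Spec_secuencia_cara; infer_instance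

-- ===== CLAIM (what is proved, stated in full; the proofs are below) =====
def Claim_equal_secuencia_cara : Prop := ∀ (lanzamientos : List String), Dom_secuencia_cara lanzamientos → Spec_secuencia_cara lanzamientos (secuencia_cara lanzamientos)

-- ===== LEMMAS AND PROOFS =====

-- A's loop over a block of j consecutive 'S': the counter advances by j and the total
-- fires exactly once iff the counter passes 6 inside the block.
theorem pv_foldA_sRun (j : Nat) (rest : List String) (c t : Int) :
    List.foldl pvStepA (c, t) (List.replicate j "S" ++ rest)
      = List.foldl pvStepA (c + j, if c < 6 ∧ 6 ≤ c + j then t + 1 else t) rest := by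
  induction j generalizing c t with
  | zero =>
    simp only [List.replicate, List.nil_append, Nat.cast_zero, add_zero]
    congr 1
    split_ifs with h
    · omega
    · rfl
  | succ n ih =>
    simp only [List.replicate_succ, List.cons_append, List.foldl_cons]
    have hstep : pvStepA (c, t) "S" = (c + 1, if c + 1 = 6 then t + 1 else t) := by
      simp [pvStepA]
    rw [hstep, ih]
    congr 1
    simp only [Prod.mk.injEq]
    refine ⟨by push_cast; ring, ?_⟩
    push_cast
    split_ifs <;> omega

-- A's loop ignores a prefix with no 'S' (the counter stays 0).
theorem pv_foldA_nonS (p rest : List String) (t : Int) (h : ∀ a ∈ p, a ≠ "S") :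
    List.foldl pvStepA (0, t) (p ++ rest) = List.foldl pvStepA (0, t) rest := by
  induction p with
  | nil => simp
  | cons x xs ih =>
    have hx : x ≠ "S" := h x (List.mem_cons_self ..)
    simp only [List.cons_append, List.foldl_cons]
    have : pvStepA (0, t) x = (0, t) := by simp [pvStepA, hx]
    rw [this]
    exact ih fun a ha => h a (List.mem_cons_of_mem _ ha)

-- the counter is irrelevant when the rest is empty or starts with a non-'S'.
theorem pv_foldA_reset (rest : List String) (c t : Int)
    (h : rest = [] ∨ ∃ y ys, rest = y :: ys ∧ y ≠ "S") :
    (List.foldl pvStepA (c, t) rest).2 = (List.foldl pvStepA (0, t) rest).2 := by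
  rcases h with h | ⟨y, ys, rfl, hy⟩
  · simp [h]
  · simp only [List.foldl_cons]
    have h1 : pvStepA (c, t) y = (0, t) := by simp [pvStepA, hy]
    have h2 : pvStepA ((0 : Int), t) y = (0, t) := by simp [pvStepA, hy]
    rw [h1, h2]

theorem pv_dropWhile_shape (p : String → Bool) (l : List String) :
    l.dropWhile p = [] ∨ ∃ y ys, l.dropWhile p = y :: ys ∧ p y = false := by
  induction l with
  | nil => left; rfl
  | cons x xs ih =>
    by_cases hx : p x
    · simpa [List.dropWhile_cons, hx] using ih
    · right
      exact ⟨x, xs, by simp [hx], by simp [hx]⟩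

theorem pv_takeWhile_eq (x : String) (l : List String) (a : String)
    (ha : a ∈ l.takeWhile (fun b => b == x)) : a = x := by
  have := List.mem_takeWhile_imp ha
  simpa using this

theorem pvAltLoop_cons (t : Int) (x : String) (xs : List String) :
    pvAltLoop t (x :: xs)
      = pvAltLoop
          (if x == "S" && decide (6 ≤ 1 + ((xs.takeWhile (fun a => a == x)).length : Int))
           then t + 1 else t)
          (xs.dropWhile (fun a => a == x)) := by
  conv_lhs => rw [pvAltLoop]

-- main invariant: A's loop with counter 0 and accumulated total t equals B's loop with total t.
theorem pv_loop_eq (n : Nat) : ∀ (l : List String), l.length ≤ n → ∀ t : Int,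
    (List.foldl pvStepA (0, t) l).2 = pvAltLoop t l := by
  induction n with
  | zero =>
    intro l hl t
    have : l = [] := List.eq_nil_of_length_eq_zero (Nat.le_zero.mp hl)
    subst this
    simp [pvAltLoop]
  | succ n ih =>
    intro l hl t
    match l with
    | [] => simp [pvAltLoop]
    | x :: xs =>
      have hsplit : xs = xs.takeWhile (fun a => a == x) ++ xs.dropWhile (fun a => a == x) :=
        (List.takeWhile_append_dropWhile).symm
      have hdroplen : (xs.dropWhile (fun a => a == x)).length ≤ n := by
        have := List.length_dropWhile_le (fun a => a == x) xs
        simp only [List.length_cons] at hl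
        omega
      by_cases hx : x = "S"
      · subst hx
        set tk := xs.takeWhile (fun a => a == "S") with htk
        set dr := xs.dropWhile (fun a => a == "S") with hdr
        have hrep : tk = List.replicate tk.length "S" :=
          List.eq_replicate_length.mpr (fun a ha => pv_takeWhile_eq "S" xs a ha)
        have hshape : dr = [] ∨ ∃ y ys, dr = y :: ys ∧ y ≠ "S" := by
          rcases pv_dropWhile_shape (fun a => a == "S") xs with h | ⟨y, ys, hy, hyf⟩
          · left; rw [hdr]; exact h
          · right; exact ⟨y, ys, by rw [hdr]; exact hy, by simpa using hyf⟩
        have hl2 : ("S" :: xs) = List.replicate (tk.length + 1) "S" ++ dr := by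
          rw [List.replicate_succ, List.cons_append]
          congr 1
          conv_lhs => rw [hsplit]
          rw [← hrep]
        rw [pvAltLoop_cons]
        conv_lhs => rw [hl2]
        rw [pv_foldA_sRun, pv_foldA_reset _ _ _ hshape, ih dr hdroplen]
        simp only [← htk, ← hdr]
        congr 1
        simp only [beq_self_eq_true, Bool.true_and, decide_eq_true_eq]
        split_ifs with p q q
        · rfl
        · exfalso; push_cast at p q; simp only [true_and] at p; omega
        · exfalso; push_cast at p q; simp only [true_and] at p; omega
        · rfl
      · have hpref : ∀ a ∈ x :: xs.takeWhile (fun a => a == x), a ≠ "S" := by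
          intro a ha
          rcases List.mem_cons.mp ha with rfl | ha
          · exact hx
          · rw [pv_takeWhile_eq x _ a ha]; exact hx
        have hl2 : (x :: xs) = (x :: xs.takeWhile (fun a => a == x)) ++ xs.dropWhile (fun a => a == x) := by
          simp only [List.cons_append]
          congr 1
        rw [pvAltLoop_cons]
        have hxb : (x == "S") = false := by simpa using hx
        simp only [hxb, Bool.false_and]
        conv_lhs => rw [hl2]
        rw [pv_foldA_nonS _ _ t hpref]
        exact ih _ hdroplen t

-- ===== VERDICT (by name: the statement is the Claim_ definition above) =====
theorem secuencia_cara_spec : Claim_equal_secuencia_cara := by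
  intro l _
  unfold Spec_secuencia_cara secuencia_cara secuencia_cara_alt
  exact pv_loop_eq l.length l (le_refl _) 0
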